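-- pv_equiv track=rewrite | github.com/zmanmurphy/Iowa-State-University---COM-S-1270-Code | Labs/Lab_8/filesExercise.py | splitContents2
-- ===== SOURCE A (Python) =====
-- def splitContents2(contents2, originalList):
--     idList = originalList[0]
--     totalAssignmentsList = []
--     for i in range(1, len(contents2)):
--         idNum = ""
--         breakNum = False
--         for char in contents2[i]:
--             idNum += char
--             for j in range(len(idList)):
--                 if idNum == idList[j]:
--                     totalAssignmentsList.append(idNum)
--                     breakNum = True
--                     break
--             if breakNum:
--                 break
--     return totalAssignmentsList
-- ===== SOURCE B (Python) =====
-- def splitContents2(contents2, originalList):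
--     idList = originalList[0]
--     result = []
--     for line in contents2[1:]:
--         candidates = [i for i in idList if i != "" and line.startswith(i)]
--         if candidates:
--             result.append(min(candidates, key=len))
--     return result
-- ===== Notes on version B (the rewrite author's own statement) =====
-- stated objective: alternative
-- what changed: A grows a prefix of each line character by character and rescans the whole id list for an exact match at every length; B filters the ids by a direct startswith test against the line and appends the shortest candidate (min by len).
import Mathlib
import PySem

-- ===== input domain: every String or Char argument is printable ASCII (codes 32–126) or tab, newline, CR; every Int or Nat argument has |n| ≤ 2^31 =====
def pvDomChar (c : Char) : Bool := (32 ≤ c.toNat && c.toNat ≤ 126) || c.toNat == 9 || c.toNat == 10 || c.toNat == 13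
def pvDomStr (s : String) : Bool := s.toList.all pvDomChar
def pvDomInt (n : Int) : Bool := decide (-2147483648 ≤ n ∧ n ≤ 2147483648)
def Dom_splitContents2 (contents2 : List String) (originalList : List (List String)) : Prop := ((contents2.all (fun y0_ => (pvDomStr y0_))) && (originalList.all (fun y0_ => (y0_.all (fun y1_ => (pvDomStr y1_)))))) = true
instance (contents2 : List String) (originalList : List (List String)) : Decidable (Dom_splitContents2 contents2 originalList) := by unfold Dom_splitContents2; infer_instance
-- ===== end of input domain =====

-- B replaces A's incremental prefix-growing loop (with its inner id scan) by a direct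
-- startswith filter over the ids plus a shortest-by-length selection; alternative, same cost.

-- ===== PORT A =====
-- inner 'for char in contents2[i]' loop of A: grow idNum one char at a time,
-- scan idList for an exact match ('for j in range(...)' with break = List.any), stop at the first hit
def splitContents2_lineA (idList : List String) : List Char → String → Option String
  | [], _ => none
  | c :: cs, idNum =>
      let idNum' := idNum.push c
      if idList.any (fun id => idNum' == id) then some idNum'
      else splitContents2_lineA idList cs idNum'

def splitContents2 (contents2 : List String) (originalList : List (List String)) : List String :=
  let idList := originalList.headD []   -- originalList[0]; Pre_ guarantees originalList ≠ []
  (contents2.drop 1).foldl (fun acc line =>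
    match splitContents2_lineA idList line.toList "" with
    | some idNum => acc ++ [idNum]
    | none => acc) []

-- ===== PORT B =====
def splitContents2_alt (contents2 : List String) (originalList : List (List String)) : List String :=
  let idList := originalList.headD []   -- originalList[0]; Pre_ guarantees originalList ≠ []
  (contents2.drop 1).foldl (fun acc line =>
    let candidates := idList.filter (fun i => (!(i == "")) && PySem.Str.startswith line i)
    match PySem.List.min? candidates (fun i => PySem.Str.len i) with
    | some m => acc ++ [m]
    | none => acc) []

-- ===== PRECONDITION & SPEC =====
-- A (and B) raise IndexError on originalList = [] (originalList[0]); nothing else raises.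
def Pre_splitContents2 (contents2 : List String) (originalList : List (List String)) : Prop :=
  originalList ≠ []
instance (contents2 : List String) (originalList : List (List String)) : Decidable (Pre_splitContents2 contents2 originalList) := by unfold Pre_splitContents2; infer_instance

def pvWitness_splitContents2 : List String × List (List String) :=
  (["header", "ab1 x", "zz"], [["ab", "z"], ["other"]])

def Spec_splitContents2 (contents2 : List String) (originalList : List (List String)) (out : List String) : Prop := out = splitContents2_alt contents2 originalList
instance (contents2 : List String) (originalList : List (List String)) (out : List String) : Decidable (Spec_splitContents2 contents2 originalList out) := by unfold Spec_splitContents2; infer_instance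

-- ===== CLAIM (what is proved, stated in full; the proofs are below) =====
def Claim_equal_splitContents2 : Prop := ∀ (contents2 : List String) (originalList : List (List String)), Dom_splitContents2 contents2 originalList → Pre_splitContents2 contents2 originalList → Spec_splitContents2 contents2 originalList (splitContents2 contents2 originalList)

-- ===== LEMMAS AND PROOFS =====

-- the per-line core: if no nonempty id is already a prefix of the consumed part s,
-- then A's prefix-growing scan over the remaining chars cs equals B's
-- shortest nonempty id that is a prefix of the whole line s.toList ++ cs
theorem lineA_eq_min (idList : List String) (cs : List Char) (s : String)
    (hpre : ∀ id ∈ idList, id.toList ≠ [] → ¬ id.toList <+: s.toList) :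
    splitContents2_lineA idList cs s =
      PySem.List.min?
        (idList.filter (fun i => (!(i == "")) && PySem.Chars.startswith (s.toList ++ cs) i.toList))
        (fun i => PySem.Str.len i) := by
  induction cs generalizing s with
  | nil =>
    have hfil : idList.filter (fun i => (!(i == "")) && PySem.Chars.startswith (s.toList ++ []) i.toList) = [] := by
      rw [List.filter_eq_nil_iff]
      intro id hid
      simp only [List.append_nil, Bool.and_eq_true, Bool.not_eq_eq_eq_not, Bool.not_true, beq_eq_false_iff_ne,
        PySem.Chars.startswith_iff, not_and]
      intro hne hp
      exact hpre id hid (fun e => hne (String.toList_inj.mp (by simp [e]))) hp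
    rw [hfil]
    simp only [splitContents2_lineA]
    exact ((PySem.List.min?_eq_none_iff _ _).mpr rfl).symm
  | cons c cs' ih =>
    have hfull : s.toList ++ c :: cs' = (s.toList ++ [c]) ++ cs' := List.append_cons _ _ _
    have hpush : (s.toList ++ [c]) <+: s.toList ++ c :: cs' := by
      rw [hfull]; exact List.prefix_append _ _
    by_cases hmatch : idList.any (fun id => s.push c == id) = true
    · -- A stops here with s.push c
      have hval : splitContents2_lineA idList (c :: cs') s = some (s.push c) := by
        simp [splitContents2_lineA, hmatch]
      rw [hval]
      obtain ⟨id0, hid0, hbeq⟩ := List.any_eq_true.mp hmatch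
      have hid0eq : id0 = s.push c := (beq_iff_eq.mp hbeq).symm
      subst hid0eq
      have hmemc : (s.push c) ∈ idList.filter (fun i => (!(i == "")) && PySem.Chars.startswith (s.toList ++ c :: cs') i.toList) := by
        rw [List.mem_filter]
        refine ⟨hid0, ?_⟩
        simp only [Bool.and_eq_true, Bool.not_eq_eq_eq_not, Bool.not_true, beq_eq_false_iff_ne,
          PySem.Chars.startswith_iff, String.toList_push]
        constructor
        · intro e
          have : (s.push c).toList = [] := by simp [e]
          simp [String.toList_push] at this
        · exact hpush
      cases hmin : PySem.List.min?
          (idList.filter (fun i => (!(i == "")) && PySem.Chars.startswith (s.toList ++ c :: cs') i.toList))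
          (fun i => PySem.Str.len i) with
      | none =>
        rw [PySem.List.min?_eq_none_iff] at hmin
        rw [hmin] at hmemc
        exact absurd hmemc (List.not_mem_nil)
      | some m =>
        -- the minimal candidate m has length s.length + 1 hence equals s.push c
        have hm := PySem.List.min?_mem hmin
        rw [List.mem_filter] at hm
        obtain ⟨hmId, hmp⟩ := hm
        simp only [Bool.and_eq_true, Bool.not_eq_eq_eq_not, Bool.not_true, beq_eq_false_iff_ne,
          PySem.Chars.startswith_iff] at hmp
        obtain ⟨hmne, hmpre⟩ := hmp
        have hmne' : m.toList ≠ [] := fun e => hmne (String.toList_inj.mp (by simp [e]))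
        have hlow : s.toList.length < m.toList.length := by
          by_contra hle
          rw [Nat.not_lt] at hle
          have hps : s.toList <+: s.toList ++ c :: cs' := List.prefix_append _ _
          exact hpre m hmId hmne' (List.prefix_of_prefix_length_le hmpre hps hle)
        have hhigh := PySem.List.min?_isMin hmin (s.push c) hmemc
        simp only [PySem.Str.len_eq, String.toList_push, List.length_append, List.length_singleton] at hhigh
        have hlen : m.toList.length = s.toList.length + 1 := by omega
        have hmeq : m.toList = s.toList ++ [c] := by
          refine List.IsPrefix.eq_of_length (List.prefix_of_prefix_length_le hmpre hpush (by simp [hlen])) ?_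
          simp [hlen]
        have : m = s.push c := String.toList_inj.mp (by simp [String.toList_push, hmeq])
        rw [this]
    · -- no match: A keeps growing; apply IH to s.push c
      have hval : splitContents2_lineA idList (c :: cs') s = splitContents2_lineA idList cs' (s.push c) := by
        simp only [splitContents2_lineA]
        rw [if_neg hmatch]
      rw [hval]
      have hpre' : ∀ id ∈ idList, id.toList ≠ [] → ¬ id.toList <+: (s.push c).toList := by
        intro id hid hne hp
        rw [String.toList_push] at hp
        have hle : id.toList.length ≤ s.toList.length + 1 := by
          have := List.IsPrefix.length_le hp
          rwa [List.length_append, List.length_singleton] at this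
        rcases Nat.lt_or_ge id.toList.length (s.toList.length + 1) with hlt | hge
        · have hps : s.toList <+: s.toList ++ [c] := List.prefix_append _ _
          exact hpre id hid hne (List.prefix_of_prefix_length_le hp hps (by omega))
        · have hideq : id.toList = s.toList ++ [c] := List.IsPrefix.eq_of_length hp (by rw [List.length_append, List.length_singleton]; omega)
          have : id = s.push c := String.toList_inj.mp (by simp [String.toList_push, hideq])
          exact hmatch (List.any_eq_true.mpr ⟨id, hid, by simp [this]⟩)
      have harg : (s.push c).toList ++ cs' = s.toList ++ c :: cs' := by
        rw [String.toList_push]; exact hfull.symm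
      rw [ih (s.push c) hpre', harg]

-- ===== VERDICT (by name: the statement is the Claim_ definition above) =====
theorem splitContents2_spec : Claim_equal_splitContents2 := by
  intro contents2 originalList _ _
  unfold Spec_splitContents2 splitContents2 splitContents2_alt
  apply PySem.List.foldl_congr_mem
  intro acc line _
  have h := lineA_eq_min (originalList.headD []) line.toList "" (by simp)
  simp only [String.toList_empty, List.nil_append] at h
  simp only [PySem.Str.startswith_eq]
  rw [h]
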